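-- pv_equiv track=rewrite | github.com/kkw-11/Problem_Solving | 코테/LINE/3_1.py | solution
-- ===== SOURCE A (Python) =====
-- def solution(num_teams, remote_tasks, office_tasks, employees):
--     answer = []
--     go_team = set()
--     sub_home_member = []
--     go_member = []
--     office_dict = {}
--     # 입력으로 주어진 자료구조 변형(문자열을 원소로 같는 리스트 -> 딕셔너리)
--     for office_task in office_tasks:
--         office_dict[office_task] = True
--
--     # 알고리즘
--     #재택근무후보 팀원과 출근하는 팀원 구하기
--     for employee_num, employee_infos in enumerate(employees):
--         emp_info = employee_infos.split()
--         for task in emp_info[1:]: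
--             if task in office_dict:
--                 go_team.add(emp_info[0])
--                 break
--         else:
--             sub_home_member.append((int(employee_num)+1,emp_info[0]))
--     # 출근하는 팀원이 아무도 없는 팀은 앞번호가 제거되어야 재택근무자 추려내기 위한 체크 전에 정렬
--     sub_home_member.sort()
--
--     # 재택근무자 후보중에 진짜 재택근무자 추려내기
--     ## 재택 근무자 후보중에서 제외되어야 할 사람은 아무도 출근하지 않는 경우이다.
--     ## 위에서 구한 출근하는 팀번호에 우리팀이 있는지 체크해서 없으면 우리팀 출근팀에 넣고 나는 재택근무자에서 빠진다.(여기서 빠진다는 answer 값에 들어가지 않는다.는 의미이다.)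
--
--     for emp in sub_home_member:
--         if emp[1] not in go_team:
--             go_team.add(emp[1])
--         else:
--             answer.append(emp[0])
--
--     return answer
-- ===== SOURCE B (Python) =====
-- def solution(num_teams, remote_tasks, office_tasks, employees):
--     office = set(office_tasks)
--     office_teams = set()
--     remote = {}
--     for num, info in enumerate(employees, 1):
--         parts = info.split()
--         team, tasks = parts[0], parts[1:]
--         if any(t in office for t in tasks):
--             office_teams.add(team)
--         else:
--             remote.setdefault(team, []).append(num)
--     answer = []
--     for team, nums in remote.items():
--         if team in office_teams:
--             answer.extend(nums)
--         else:
--             answer.extend(nums[1:])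
--     answer.sort()
--     return answer
-- ===== Notes on version B (the rewrite author's own statement) =====
-- stated objective: alternative
-- what changed: Replaces A's promote-first-while-scanning pass over a sorted candidate list by a group-by-team index (team -> ascending remote numbers) with per-team emission (all numbers for office teams, all but the smallest otherwise) followed by a final sort.
import Mathlib
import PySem

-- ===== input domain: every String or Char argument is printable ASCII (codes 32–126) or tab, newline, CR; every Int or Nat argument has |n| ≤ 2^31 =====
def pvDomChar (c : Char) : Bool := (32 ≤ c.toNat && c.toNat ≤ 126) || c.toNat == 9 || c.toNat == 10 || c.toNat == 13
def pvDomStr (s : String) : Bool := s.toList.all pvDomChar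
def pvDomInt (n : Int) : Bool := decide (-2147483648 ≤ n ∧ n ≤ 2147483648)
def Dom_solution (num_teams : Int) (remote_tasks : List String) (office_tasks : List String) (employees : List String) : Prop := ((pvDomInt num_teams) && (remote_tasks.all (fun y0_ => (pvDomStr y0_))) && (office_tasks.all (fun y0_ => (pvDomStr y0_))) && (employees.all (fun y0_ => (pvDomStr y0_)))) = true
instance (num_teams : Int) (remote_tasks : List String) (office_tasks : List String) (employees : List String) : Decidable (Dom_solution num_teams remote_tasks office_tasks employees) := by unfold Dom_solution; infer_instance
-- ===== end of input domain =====

-- B replaces A's promote-first scan over a sorted candidate list by a group-by-team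
-- index with per-team emission and a final sort (objective: alternative decomposition).

-- ===== PORT A =====
-- Note: emp_info[0] raises IndexError on an all-whitespace employee string; Pre_solution
-- excludes exactly those inputs, so 'headD ""' is exact on the admitted domain.
def solution (num_teams : Int) (remote_tasks : List String) (office_tasks : List String) (employees : List String) : List Int :=
  let office_dict : PySem.Dict String Bool :=
    office_tasks.foldl (fun d t => d.insert t true) PySem.Dict.empty
  let st :=
    (PySem.List.enumerate employees).foldl
      (fun (s : PySem.Set String × List (Int × String)) p =>
        let emp_info := PySem.Str.split₀ p.2
        if (PySem.List.slice emp_info (some 1) none).any (fun task => office_dict.contains task) then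
          (PySem.Set.add s.1 (emp_info.headD ""), s.2)
        else
          (s.1, s.2 ++ [(p.1 + 1, emp_info.headD "")]))
      (PySem.Set.empty, [])
  let sub_home_member := PySem.List.sorted2 st.2 (fun e => e.1) (fun e => e.2)
  let fin :=
    sub_home_member.foldl
      (fun (s : PySem.Set String × List Int) emp =>
        if !(PySem.Set.contains s.1 emp.2) then (PySem.Set.add s.1 emp.2, s.2)
        else (s.1, s.2 ++ [emp.1]))
      (st.1, ([] : List Int))
  fin.2

-- ===== PORT B =====
-- Note: parts[0] raises IndexError on an all-whitespace employee string; Pre_solution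
-- excludes exactly those inputs, so 'headD ""' is exact on the admitted domain.
def solution_alt (num_teams : Int) (remote_tasks : List String) (office_tasks : List String) (employees : List String) : List Int :=
  let office : PySem.Set String := PySem.Set.ofList office_tasks
  let st :=
    (PySem.List.enumerate employees 1).foldl
      (fun (s : PySem.Set String × PySem.Dict String (List Int)) p =>
        let parts := PySem.Str.split₀ p.2
        let team := parts.headD ""
        let tasks := PySem.List.slice parts (some 1) none
        if tasks.any (fun t => PySem.Set.contains office t) then
          (PySem.Set.add s.1 team, s.2)
        else
          (s.1, s.2.modify team [] (fun v => v ++ [p.1])))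
      (PySem.Set.empty, PySem.Dict.empty)
  let answer :=
    st.2.items.foldl
      (fun (acc : List Int) q =>
        if PySem.Set.contains st.1 q.1 then acc ++ q.2
        else acc ++ PySem.List.slice q.2 (some 1) none)
      []
  PySem.List.sorted answer (fun x => x)

-- ===== PRECONDITION & SPEC =====
-- Pre_ excludes exactly the employee strings that are empty/whitespace-only: there
-- emp_info[0] raises IndexError in A (and parts[0] in B).
def Pre_solution (num_teams : Int) (remote_tasks : List String) (office_tasks : List String) (employees : List String) : Prop :=
  ∀ e ∈ employees, PySem.Str.split₀ e ≠ []
instance (num_teams : Int) (remote_tasks : List String) (office_tasks : List String) (employees : List String) : Decidable (Pre_solution num_teams remote_tasks office_tasks employees) := by unfold Pre_solution; infer_instance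

def pvWitness_solution : Int × List String × List String × List String :=
  (3, ["q"], ["p"], ["alpha p x", "beta q", "beta q", "gamma z"])

def Spec_solution (num_teams : Int) (remote_tasks : List String) (office_tasks : List String) (employees : List String) (out : List Int) : Prop := out = solution_alt num_teams remote_tasks office_tasks employees
instance (num_teams : Int) (remote_tasks : List String) (office_tasks : List String) (employees : List String) (out : List Int) : Decidable (Spec_solution num_teams remote_tasks office_tasks employees out) := by unfold Spec_solution; infer_instance

-- ===== CLAIM (what is proved, stated in full; the proofs are below) =====
def Claim_equal_solution : Prop := ∀ (num_teams : Int) (remote_tasks : List String) (office_tasks : List String) (employees : List String), Dom_solution num_teams remote_tasks office_tasks employees → Pre_solution num_teams remote_tasks office_tasks employees → Spec_solution num_teams remote_tasks office_tasks employees (solution num_teams remote_tasks office_tasks employees)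

-- ===== LEMMAS AND PROOFS =====

def pvTeam (e : String) : String := (PySem.Str.split₀ e).headD ""
def pvOff (ot : List String) (e : String) : Bool :=
  ((PySem.Str.split₀ e).tail).any (fun t => decide (t ∈ ot))
def pvL (ot : List String) (employees : List String) : List (Int × String) :=
  ((PySem.List.enumerate employees).filter (fun p => !pvOff ot p.2)).map
    (fun p => (p.1 + 1, pvTeam p.2))
def pvG (ot : List String) (employees : List String) : PySem.Set String :=
  employees.foldl (fun s e => if pvOff ot e then PySem.Set.add s (pvTeam e) else s) PySem.Set.empty
def pvEmit (G : PySem.Set String) : List (Int × String) → List Int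
  | [] => []
  | p :: r => if p.2 ∈ G then p.1 :: pvEmit G r else pvEmit (PySem.Set.add G p.2) r

theorem pvL_pairwise (ot employees) :
    (pvL ot employees).Pairwise (fun a b => a.1 < b.1) := by
  unfold pvL
  rw [List.pairwise_map]
  exact ((PySem.List.pairwise_lt_enumerate employees 0).filter _).imp (by intro a b h; simpa using h)

theorem office_contains (ot : List String) (t : String) :
    (ot.foldl (fun d s => d.insert s (true : Bool)) PySem.Dict.empty).contains t
      = decide (t ∈ ot) := by
  rw [PySem.Dict.contains_eq_decide_mem_keys, PySem.Dict.keys_foldl_insert (f := fun _ _ => true)]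
  simp [PySem.Set.mem_update, PySem.Dict.keys_empty]

theorem set_ofList_contains (ot : List String) (t : String) :
    PySem.Set.contains (PySem.Set.ofList ot) t = decide (t ∈ ot) := by
  by_cases h : t ∈ ot <;>
    simp [h, PySem.Set.mem_ofList]

theorem foldl_insertBy_self {α : Type} (before : α → α → Bool) (L : List α) : ∀ acc : List α,
    (acc ++ L).Pairwise (fun a b => before b a = false) →
    L.foldl (fun acc x => PySem.List.insertBy before x acc) acc = acc ++ L := by
  induction L with
  | nil => intro acc h; simp
  | cons x r ih =>
    intro acc h
    have hx : ∀ y ∈ acc, before x y = false := by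
      intro y hy
      have := List.pairwise_append.1 h
      exact this.2.2 y hy x (by simp)
    rw [List.foldl_cons, PySem.List.insertBy_of_forall_not_before before x acc hx,
      ih (acc ++ [x]) (by simpa using h)]
    simp

theorem sorted2_eq_self (L : List (Int × String))
    (hL : L.Pairwise (fun a b => a.1 < b.1)) :
    PySem.List.sorted2 L (fun e => e.1) (fun e => e.2) = L := by
  unfold PySem.List.sorted2
  simp only [Bool.false_eq_true, if_false]
  refine foldl_insertBy_self _ L [] ?_
  simp only [List.nil_append]
  refine hL.imp ?_
  intro a b h
  have h1 : decide (b.1 < a.1) = false := by simp [not_lt_of_gt h]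
  have h2 : decide (a.1 < b.1) = true := by simp [h]
  simp [h1, h2]

theorem foldl_pvEmit (L : List (Int × String)) : ∀ (G : PySem.Set String) (acc : List Int),
    (L.foldl
      (fun (s : PySem.Set String × List Int) emp =>
        if !(PySem.Set.contains s.1 emp.2) then (PySem.Set.add s.1 emp.2, s.2)
        else (s.1, s.2 ++ [emp.1]))
      (G, acc)).2 = acc ++ pvEmit G L := by
  induction L with
  | nil => intro G acc; simp [pvEmit]
  | cons p r ih =>
    intro G acc
    by_cases h : p.2 ∈ G
    · have hc : PySem.Set.contains G p.2 = true := (PySem.Set.contains_iff G p.2).2 h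
      rw [List.foldl_cons]
      simp only [hc, Bool.not_true, Bool.false_eq_true, if_false]
      rw [ih G (acc ++ [p.1])]
      simp [pvEmit, h]
    · have hc : PySem.Set.contains G p.2 = false := by
        simpa using fun hcc => h ((PySem.Set.contains_iff G p.2).1 hcc)
      rw [List.foldl_cons]
      simp only [hc, Bool.not_false, if_true]
      rw [ih (PySem.Set.add G p.2) acc]
      simp [pvEmit, h]

theorem pvEmit_sublist (L : List (Int × String)) : ∀ G,
    (pvEmit G L).Sublist (L.map (fun p => p.1)) := by
  induction L with
  | nil => intro G; simp [pvEmit]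
  | cons p r ih =>
    intro G
    by_cases h : p.2 ∈ G
    · simpa [pvEmit, h] using (ih G).cons₂ p.1
    · simpa [pvEmit, h] using (ih (PySem.Set.add G p.2)).cons p.1

theorem mem_drop_one (l : List Int) (hl : l.Pairwise (· < ·)) (n : Int) :
    n ∈ l.drop 1 ↔ n ∈ l ∧ ∃ m ∈ l, m < n := by
  cases l with
  | nil => simp
  | cons h t =>
    simp only [List.drop_one, List.tail_cons, List.mem_cons]
    constructor
    · intro hn
      exact ⟨Or.inr hn, ⟨h, by simp, (List.pairwise_cons.1 hl).1 n hn⟩⟩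
    · rintro ⟨hn, m, hm, hmn⟩
      rcases hn with rfl | hn
      · rcases hm with rfl | hm
        · exact absurd hmn (lt_irrefl m)
        · exact absurd ((List.pairwise_cons.1 hl).1 m hm) (by omega)
      · exact hn

theorem mem_pvEmit (L : List (Int × String)) :
    L.Pairwise (fun a b => a.1 < b.1) → ∀ (G : PySem.Set String) (n : Int),
    (n ∈ pvEmit G L ↔ ∃ p ∈ L, p.1 = n ∧ (p.2 ∈ G ∨ ∃ q ∈ L, q.2 = p.2 ∧ q.1 < n)) := by
  induction L with
  | nil => intro _ G n; simp [pvEmit]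
  | cons a r ih =>
    intro hL G n
    have ha : ∀ b ∈ r, a.1 < b.1 := (List.pairwise_cons.1 hL).1
    have hr := (List.pairwise_cons.1 hL).2
    by_cases hG : a.2 ∈ G
    · rw [pvEmit, if_pos hG]
      constructor
      · intro hn
        rcases List.mem_cons.1 hn with rfl | hn'
        · exact ⟨a, by simp, rfl, Or.inl hG⟩
        · rcases (ih hr G n).1 hn' with ⟨p, hp, hpn, hcond⟩
          refine ⟨p, by simp [hp], hpn, ?_⟩
          rcases hcond with h | ⟨q, hq, hqp, hqn⟩
          · exact Or.inl h
          · exact Or.inr ⟨q, by simp [hq], hqp, hqn⟩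
      · rintro ⟨p, hp, hpn, hcond⟩
        rcases List.mem_cons.1 hp with rfl | hp'
        · exact List.mem_cons.2 (Or.inl hpn.symm)
        · refine List.mem_cons.2 (Or.inr ((ih hr G n).2 ⟨p, hp', hpn, ?_⟩))
          rcases hcond with h | ⟨q, hq, hqp, hqn⟩
          · exact Or.inl h
          · rcases List.mem_cons.1 hq with rfl | hq'
            · exact Or.inl (hqp ▸ hG)
            · exact Or.inr ⟨q, hq', hqp, hqn⟩
    · rw [pvEmit, if_neg hG]
      rw [ih hr (PySem.Set.add G a.2) n]
      constructor
      · rintro ⟨p, hp', hpn, hcond⟩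
        refine ⟨p, by simp [hp'], hpn, ?_⟩
        rcases hcond with h | ⟨q, hq', hqp, hqn⟩
        · rcases (PySem.Set.mem_add G a.2 p.2).1 h with h' | h'
          · exact Or.inl h'
          · exact Or.inr ⟨a, by simp, h'.symm, hpn ▸ ha p hp'⟩
        · exact Or.inr ⟨q, by simp [hq'], hqp, hqn⟩
      · rintro ⟨p, hp, hpn, hcond⟩
        rcases List.mem_cons.1 hp with rfl | hp'
        · exfalso
          rcases hcond with h | ⟨q, hq, hqp, hqn⟩
          · exact hG h
          · rcases List.mem_cons.1 hq with rfl | hq'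
            · exact absurd (hpn ▸ hqn) (lt_irrefl n)
            · exact absurd hqn (by have := ha q hq'; omega)
        · refine ⟨p, hp', hpn, ?_⟩
          rcases hcond with h | ⟨q, hq, hqp, hqn⟩
          · exact Or.inl ((PySem.Set.mem_add G a.2 p.2).2 (Or.inl h))
          · rcases List.mem_cons.1 hq with rfl | hq'
            · exact Or.inl ((PySem.Set.mem_add _ _ _).2 (Or.inr hqp.symm))
            · exact Or.inr ⟨q, hq', hqp, hqn⟩

-- a loop over enumerate(xs) whose body ignores the index is a loop over xs
theorem foldl_enumerate_snd {alpha sigma : Type} (xs : List alpha) (s : Int)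
    (g : sigma → alpha → sigma) : ∀ init : sigma,
    (PySem.List.enumerate xs s).foldl (fun acc p => g acc p.2) init = xs.foldl g init := by
  induction xs generalizing s with
  | nil => intro init; simp [PySem.List.enumerate_nil]
  | cons x r ih => intro init; simp [PySem.List.enumerate_cons, ih]

theorem enumerate_shift {alpha : Type} (xs : List alpha) : ∀ s : Int,
    PySem.List.enumerate xs (s + 1)
      = (PySem.List.enumerate xs s).map (fun p => (p.1 + 1, p.2)) := by
  induction xs with
  | nil => intro s; simp [PySem.List.enumerate_nil]
  | cons x r ih => intro s; simp [PySem.List.enumerate_cons, ih]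

theorem enumerate_one {alpha : Type} (xs : List alpha) :
    PySem.List.enumerate xs 1
      = (PySem.List.enumerate xs 0).map (fun p => (p.1 + 1, p.2)) := by
  have := enumerate_shift xs 0
  norm_num at this
  exact this

def pvNums (ot : List String) (employees : List String) (k : String) : List Int :=
  ((pvL ot employees).filter (fun p => p.2 == k)).map (fun p => p.1)

def pvM1 (ot : List String) (employees : List String) : List (Int × String) :=
  (PySem.List.enumerate employees 1).filter (fun p => !pvOff ot p.2)

def pvD (ot : List String) (employees : List String) : PySem.Dict String (List Int) :=
  (pvM1 ot employees).foldl
    (fun d p => PySem.Dict.modify d (pvTeam p.2) [] (fun v => v ++ [p.1])) PySem.Dict.empty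

theorem pvM1_map_team (ot employees : List String) :
    (pvM1 ot employees).map (fun p => pvTeam p.2) = (pvL ot employees).map (fun p => p.2) := by
  simp only [pvM1, pvL, enumerate_one, List.filter_map, List.map_map]
  rfl

theorem pvD_keys (ot employees : List String) :
    (pvD ot employees).keys = PySem.Set.ofList ((pvL ot employees).map (fun p => p.2)) := by
  unfold pvD
  rw [PySem.Dict.keys_foldl_modify_key (pvM1 ot employees) (fun p => pvTeam p.2) []
    (fun _ p => fun v => v ++ [p.1]) PySem.Dict.empty]
  rw [PySem.Dict.keys_empty, PySem.Set.update_nil_left, pvM1_map_team]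

theorem pvD_keys_nodup (ot employees : List String) : (pvD ot employees).keys.Nodup := by
  rw [pvD_keys]
  exact PySem.Set.nodup_ofList _

theorem pvD_getD (ot employees : List String) (k : String) :
    (pvD ot employees).getD k [] = pvNums ot employees k := by
  unfold pvD
  rw [← List.foldl_map (f := fun p : Int × String => (pvTeam p.2, p.1))
    (g := fun (d : PySem.Dict String (List Int)) (q : String × Int) =>
      PySem.Dict.modify d q.1 [] (fun v => v ++ [q.2]))]
  rw [PySem.Dict.getD_foldl_modify_append]
  rw [PySem.Dict.getD_empty, List.nil_append, List.filter_map, List.map_map]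
  simp only [pvM1, pvNums, pvL, enumerate_one, List.filter_map, List.map_map, List.filter_filter]
  rfl

theorem A_eq (num_teams remote_tasks ot employees : _) :
    solution num_teams remote_tasks ot employees
      = pvEmit (pvG ot employees) (pvL ot employees) := by
  simp only [solution]
  have h1 : (List.foldl (fun (s : PySem.Set String × List (Int × String)) (p : Int × String) =>
        if ((PySem.List.slice (PySem.Str.split₀ p.2) (some 1) none).any fun task =>
              (List.foldl (fun d t => d.insert t true) PySem.Dict.empty ot).contains task) = true then
          (PySem.Set.add s.1 ((PySem.Str.split₀ p.2).headD ""), s.2)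
        else (s.1, s.2 ++ [(p.1 + 1, (PySem.Str.split₀ p.2).headD "")]))
      (PySem.Set.empty, []) (PySem.List.enumerate employees))
      = (pvG ot employees, pvL ot employees) := by
    rw [PySem.List.foldl_congr_mem
        (g := fun (s : PySem.Set String × List (Int × String)) (p : Int × String) =>
          ((fun (s1 : PySem.Set String) (e : Int × String) =>
              if pvOff ot e.2 then PySem.Set.add s1 (pvTeam e.2) else s1) s.1 p,
           (fun (s2 : List (Int × String)) (e : Int × String) =>
              if !pvOff ot e.2 then s2 ++ [(e.1 + 1, pvTeam e.2)] else s2) s.2 p))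
        (h := by
          intro acc p _
          have hcond : (PySem.List.slice (PySem.Str.split₀ p.2) (some 1) none).any
              (fun task => (List.foldl (fun d t => d.insert t true) PySem.Dict.empty ot).contains task)
              = pvOff ot p.2 := by
            rw [PySem.List.slice_from_one]
            unfold pvOff
            exact PySem.List.any_congr_mem (fun t _ => office_contains ot t)
          rw [hcond]
          by_cases h : pvOff ot p.2 <;> simp [h, pvTeam])]
    rw [PySem.List.foldl_prod_mk
        (f := fun (s1 : PySem.Set String) (e : Int × String) =>
          if pvOff ot e.2 then PySem.Set.add s1 (pvTeam e.2) else s1)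
        (g := fun (s2 : List (Int × String)) (e : Int × String) =>
          if !pvOff ot e.2 then s2 ++ [(e.1 + 1, pvTeam e.2)] else s2)]
    have hG : List.foldl (fun (s1 : PySem.Set String) (e : Int × String) =>
          if pvOff ot e.2 then PySem.Set.add s1 (pvTeam e.2) else s1) PySem.Set.empty
          (PySem.List.enumerate employees) = pvG ot employees := by
      rw [foldl_enumerate_snd employees 0
        (fun s1 e => if pvOff ot e then PySem.Set.add s1 (pvTeam e) else s1)]
      rfl
    have hL : List.foldl (fun (s2 : List (Int × String)) (e : Int × String) =>
          if !pvOff ot e.2 then s2 ++ [(e.1 + 1, pvTeam e.2)] else s2) []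
          (PySem.List.enumerate employees) = pvL ot employees := by
      rw [PySem.List.foldl_append_if (p := fun e : Int × String => !pvOff ot e.2)
        (f := fun e : Int × String => (e.1 + 1, pvTeam e.2))]
      simp [pvL]
    rw [hG, hL]
  rw [h1]
  dsimp only
  rw [sorted2_eq_self _ (pvL_pairwise ot employees), foldl_pvEmit]
  simp

theorem B_eq (num_teams remote_tasks ot employees : _) :
    solution_alt num_teams remote_tasks ot employees
      = PySem.List.sorted
          ((PySem.Set.ofList ((pvL ot employees).map (fun p => p.2))).flatMap
            (fun k => if PySem.Set.contains (pvG ot employees) k then pvNums ot employees k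
                      else (pvNums ot employees k).drop 1))
          (fun x => x) := by
  simp only [solution_alt]
  have h1 : (List.foldl (fun (s : PySem.Set String × PySem.Dict String (List Int)) (p : Int × String) =>
        if ((PySem.List.slice (PySem.Str.split₀ p.2) (some 1) none).any fun t =>
              PySem.Set.contains (PySem.Set.ofList ot) t) = true then
          (PySem.Set.add s.1 ((PySem.Str.split₀ p.2).headD ""), s.2)
        else (s.1, PySem.Dict.modify s.2 ((PySem.Str.split₀ p.2).headD "") [] (fun v => v ++ [p.1])))
      (PySem.Set.empty, PySem.Dict.empty) (PySem.List.enumerate employees 1))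
      = (pvG ot employees, pvD ot employees) := by
    rw [PySem.List.foldl_congr_mem
        (g := fun (s : PySem.Set String × PySem.Dict String (List Int)) (p : Int × String) =>
          ((fun (s1 : PySem.Set String) (e : Int × String) =>
              if pvOff ot e.2 then PySem.Set.add s1 (pvTeam e.2) else s1) s.1 p,
           (fun (d : PySem.Dict String (List Int)) (e : Int × String) =>
              if !pvOff ot e.2 then PySem.Dict.modify d (pvTeam e.2) [] (fun v => v ++ [e.1]) else d) s.2 p))
        (h := by
          intro acc p _
          have hcond : (PySem.List.slice (PySem.Str.split₀ p.2) (some 1) none).any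
              (fun t => PySem.Set.contains (PySem.Set.ofList ot) t) = pvOff ot p.2 := by
            rw [PySem.List.slice_from_one]
            unfold pvOff
            exact PySem.List.any_congr_mem (fun t _ => set_ofList_contains ot t)
          rw [hcond]
          by_cases h : pvOff ot p.2 <;> simp [h, pvTeam])]
    rw [PySem.List.foldl_prod_mk
        (f := fun (s1 : PySem.Set String) (e : Int × String) =>
          if pvOff ot e.2 then PySem.Set.add s1 (pvTeam e.2) else s1)
        (g := fun (d : PySem.Dict String (List Int)) (e : Int × String) =>
          if !pvOff ot e.2 then PySem.Dict.modify d (pvTeam e.2) [] (fun v => v ++ [e.1]) else d)]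
    have hG : List.foldl (fun (s1 : PySem.Set String) (e : Int × String) =>
          if pvOff ot e.2 then PySem.Set.add s1 (pvTeam e.2) else s1) PySem.Set.empty
          (PySem.List.enumerate employees 1) = pvG ot employees := by
      rw [foldl_enumerate_snd employees 1
        (fun s1 e => if pvOff ot e then PySem.Set.add s1 (pvTeam e) else s1)]
      rfl
    have hD : List.foldl (fun (d : PySem.Dict String (List Int)) (e : Int × String) =>
          if !pvOff ot e.2 then PySem.Dict.modify d (pvTeam e.2) [] (fun v => v ++ [e.1]) else d)
          PySem.Dict.empty (PySem.List.enumerate employees 1) = pvD ot employees := by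
      rw [PySem.List.foldl_if_eq_foldl_filter (p := fun e : Int × String => !pvOff ot e.2)
        (f := fun (d : PySem.Dict String (List Int)) (e : Int × String) =>
          PySem.Dict.modify d (pvTeam e.2) [] (fun v => v ++ [e.1]))]
      rfl
    rw [hG, hD]
  rw [h1]
  dsimp only
  rw [PySem.List.foldl_congr_mem
      (g := fun (acc : List Int) (q : String × List Int) =>
        acc ++ (if PySem.Set.contains (pvG ot employees) q.1 = true then q.2 else q.2.drop 1))
      (h := by
        intro acc q _
        rw [PySem.List.slice_from_one, ← List.drop_one]
        by_cases h : q.1 ∈ pvG ot employees <;> simp [h])]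
  rw [PySem.List.foldl_append_eq_flatMap
      (g := fun q : String × List Int =>
        if PySem.Set.contains (pvG ot employees) q.1 = true then q.2 else q.2.drop 1)]
  rw [List.nil_append]
  rw [PySem.Dict.items_eq_map_keys (pvD ot employees) (pvD_keys_nodup ot employees) []]
  rw [List.flatMap_map]
  simp only [pvD_getD, pvD_keys]

theorem mem_pvNums (ot employees : List String) (k : String) (n : Int) :
    n ∈ pvNums ot employees k ↔ (n, k) ∈ pvL ot employees := by
  unfold pvNums
  simp only [List.mem_map, List.mem_filter, beq_iff_eq]
  constructor
  · rintro ⟨p, ⟨hp, hk⟩, rfl⟩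
    have hpk : (p.1, k) = p := by rw [← hk]
    rwa [hpk]
  · intro h
    exact ⟨(n, k), ⟨h, rfl⟩, rfl⟩

theorem pvNums_pairwise (ot employees : List String) (k : String) :
    (pvNums ot employees k).Pairwise (· < ·) := by
  unfold pvNums
  rw [List.pairwise_map]
  exact (pvL_pairwise ot employees).filter _

theorem pvNums_nodup (ot employees : List String) (k : String) :
    (pvNums ot employees k).Nodup :=
  (pvNums_pairwise ot employees k).imp ne_of_lt

theorem final_sorted (ot employees : List String) :
    PySem.List.sorted
        ((PySem.Set.ofList ((pvL ot employees).map (fun p => p.2))).flatMap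
          (fun k => if PySem.Set.contains (pvG ot employees) k then pvNums ot employees k
                    else (pvNums ot employees k).drop 1))
        (fun x => x)
      = pvEmit (pvG ot employees) (pvL ot employees) := by
  have hLpw := pvL_pairwise ot employees
  have hfst : ((pvL ot employees).map (fun p => p.1)).Pairwise (· < ·) :=
    List.pairwise_map.2 hLpw
  have hnodupfst : ((pvL ot employees).map (fun p => p.1)).Nodup := hfst.imp ne_of_lt
  have hsubnums : ∀ k, (if PySem.Set.contains (pvG ot employees) k = true
      then pvNums ot employees k else (pvNums ot employees k).drop 1)
      ⊆ pvNums ot employees k := by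
    intro k n hn
    by_cases h : PySem.Set.contains (pvG ot employees) k = true
    · rwa [if_pos h] at hn
    · rw [if_neg h] at hn
      exact List.mem_of_mem_drop hn
  refine PySem.List.sorted_eq_of_perm_of_pairwise_lt _ _ _ ?_ ?_
  · -- permutation
    have hemit_nodup : (pvEmit (pvG ot employees) (pvL ot employees)).Nodup :=
      hnodupfst.sublist (pvEmit_sublist _ _)
    have hflat_nodup :
        ((PySem.Set.ofList ((pvL ot employees).map (fun p => p.2))).flatMap
          (fun k => if PySem.Set.contains (pvG ot employees) k then pvNums ot employees k
                    else (pvNums ot employees k).drop 1)).Nodup := by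
      rw [List.nodup_flatMap]
      constructor
      · intro k _
        by_cases h : PySem.Set.contains (pvG ot employees) k = true
        · rw [if_pos h]; exact pvNums_nodup ot employees k
        · rw [if_neg h]; exact (pvNums_nodup ot employees k).sublist (List.drop_sublist _ _)
      · refine (PySem.Set.nodup_ofList _).imp ?_
        intro k k' hne n hn hn'
        have h1 := (mem_pvNums ot employees k n).1 (hsubnums k hn)
        have h2 := (mem_pvNums ot employees k' n).1 (hsubnums k' hn')
        exact hne (congrArg Prod.snd
          (List.inj_on_of_nodup_map hnodupfst h1 h2 rfl))
    refine (List.perm_ext_iff_of_nodup hemit_nodup hflat_nodup).2 ?_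
    intro n
    rw [mem_pvEmit _ hLpw]
    constructor
    · rintro ⟨p, hp, rfl, hcond⟩
      rw [List.mem_flatMap]
      refine ⟨p.2, (PySem.Set.mem_ofList _ _).2 (List.mem_map.2 ⟨p, hp, rfl⟩), ?_⟩
      by_cases hg : p.2 ∈ pvG ot employees
      · rw [if_pos ((PySem.Set.contains_iff _ _).2 hg)]
        exact (mem_pvNums ot employees p.2 p.1).2 hp
      · have hc : ¬ PySem.Set.contains (pvG ot employees) p.2 = true := fun hcc =>
          hg ((PySem.Set.contains_iff _ _).1 hcc)
        rw [if_neg hc]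
        rcases hcond with h | ⟨q, hq, hq2, hq1⟩
        · exact absurd h hg
        · rw [mem_drop_one _ (pvNums_pairwise ot employees p.2)]
          refine ⟨(mem_pvNums ot employees p.2 p.1).2 hp,
            q.1, (mem_pvNums ot employees p.2 q.1).2 ?_, hq1⟩
          have hqe : (q.1, p.2) = q := by rw [← hq2]
          rwa [hqe]
    · intro hn
      rw [List.mem_flatMap] at hn
      rcases hn with ⟨k, _, hnF⟩
      by_cases hg : PySem.Set.contains (pvG ot employees) k = true
      · rw [if_pos hg] at hnF
        exact ⟨(n, k), (mem_pvNums ot employees k n).1 hnF, rfl,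
          Or.inl ((PySem.Set.contains_iff _ _).1 hg)⟩
      · rw [if_neg hg] at hnF
        rw [mem_drop_one _ (pvNums_pairwise ot employees k)] at hnF
        rcases hnF with ⟨h1, m, hm, hmn⟩
        exact ⟨(n, k), (mem_pvNums ot employees k n).1 h1, rfl,
          Or.inr ⟨(m, k), (mem_pvNums ot employees k m).1 hm, rfl, hmn⟩⟩
  · -- pairwise
    exact hfst.sublist (pvEmit_sublist _ _)

-- ===== VERDICT (by name: the statement is the Claim_ definition above) =====
theorem solution_spec : Claim_equal_solution := by
  intro num_teams remote_tasks office_tasks employees _hDom _hPre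
  unfold Spec_solution
  rw [A_eq, B_eq, final_sorted]
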